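-- pv_equiv track=rewrite | github.com/hmnshudhmn24/leetcode-daily-challenge | 2437. Number of Valid Clock Times.py | countTime
-- ===== SOURCE A (Python) =====
-- def countTime(time: str) -> int:
--     ans = 0
--     for h in range(24):
--         for m in range(60):
--             s = f"{h:02d}:{m:02d}"
--             if all(time[i] == '?' or time[i] == s[i] for i in range(5)):
--                 ans += 1
--     return ans
-- ===== SOURCE B (Python) =====
-- def countTime(time: str) -> int:
--     h1, h2, c, m1, m2 = time[0:1], time[1:2], time[2:3], time[3:4], time[4:5]
--     if h1 == "?" and h2 == "?":
--         hours = 24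
--     elif h1 == "?":
--         hours = 3 if h2 in ("0", "1", "2", "3") else (2 if h2 in ("4", "5", "6", "7", "8", "9") else 0)
--     elif h2 == "?":
--         hours = 10 if h1 in ("0", "1") else (4 if h1 == "2" else 0)
--     else:
--         hours = 1 if ((h1 in ("0", "1") and h2 in ("0", "1", "2", "3", "4", "5", "6", "7", "8", "9"))
--                       or (h1 == "2" and h2 in ("0", "1", "2", "3"))) else 0
--     colon = 1 if c in (":", "?") else 0
--     tens = 6 if m1 == "?" else (1 if m1 in ("0", "1", "2", "3", "4", "5") else 0)
--     ones = 10 if m2 == "?" else (1 if m2 in ("0", "1", "2", "3", "4", "5", "6", "7", "8", "9") else 0)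
--     return hours * colon * tens * ones
-- ===== Notes on version B (the rewrite author's own statement) =====
-- stated objective: faster
-- what changed: Replaced the 24x60 brute-force enumeration of all clock times by a closed-form combinatorial count: the hour pattern and minute pattern are counted independently (with the hour tens/ones coupling handled by explicit cases) and the counts multiplied.
import Mathlib
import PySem

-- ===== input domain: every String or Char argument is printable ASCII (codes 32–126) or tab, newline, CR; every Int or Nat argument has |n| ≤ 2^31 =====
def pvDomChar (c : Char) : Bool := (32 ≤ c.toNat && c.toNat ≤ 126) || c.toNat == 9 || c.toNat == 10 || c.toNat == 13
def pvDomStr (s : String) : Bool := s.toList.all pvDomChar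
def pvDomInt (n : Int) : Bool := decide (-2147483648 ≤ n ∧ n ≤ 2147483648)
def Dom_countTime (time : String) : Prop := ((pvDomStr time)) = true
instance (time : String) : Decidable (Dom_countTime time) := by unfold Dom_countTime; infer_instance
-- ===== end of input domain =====

-- B replaces A's brute-force scan of all 1440 clock times by a closed-form combinatorial
-- count (hour cases × minute digit choices).


-- ===== PORT A =====
-- f"{n:02d}" — exact for 0 ≤ n < 100 (here n is an hour in [0,24) or a minute in [0,60))
def pvFmt2 (n : Int) : List Char :=
  [Nat.digitChar (PySem.Int.floordiv n 10).toNat, Nat.digitChar (PySem.Int.mod n 10).toNat]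

-- all(time[i] == '?' or time[i] == s[i] for i in range(5)); none = IndexError, excluded by Pre_
def pvMatch (time : String) (s : List Char) : Bool :=
  (List.range 5).all fun i =>
    match PySem.Str.pyGet? time (Int.ofNat i) with
    | some c => c == '?' || c == s.getD i ' '
    | none => false

def countTime (time : String) : Int :=
  (PySem.List.pyRange 0 24 1).foldl (fun ans h =>
    (PySem.List.pyRange 0 60 1).foldl (fun ans m =>
      if pvMatch time (pvFmt2 h ++ ':' :: pvFmt2 m) then ans + 1 else ans) ans) 0

-- ===== PORT B =====
-- one-character slices time[k:k+1] (empty on a too-short string), compared as strings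
def countTime_alt (time : String) : Int :=
  let l := time.toList
  let h1 := PySem.List.slice l (some 0) (some 1)
  let h2 := PySem.List.slice l (some 1) (some 2)
  let c  := PySem.List.slice l (some 2) (some 3)
  let m1 := PySem.List.slice l (some 3) (some 4)
  let m2 := PySem.List.slice l (some 4) (some 5)
  let hours : Int :=
    if h1 = ['?'] ∧ h2 = ['?'] then 24
    else if h1 = ['?'] then
      (if h2 ∈ [['0'],['1'],['2'],['3']] then 3
       else if h2 ∈ [['4'],['5'],['6'],['7'],['8'],['9']] then 2 else 0)
    else if h2 = ['?'] then
      (if h1 ∈ [['0'],['1']] then 10 else if h1 = ['2'] then 4 else 0)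
    else if (h1 ∈ [['0'],['1']] ∧ h2 ∈ [['0'],['1'],['2'],['3'],['4'],['5'],['6'],['7'],['8'],['9']]) ∨
            (h1 = ['2'] ∧ h2 ∈ [['0'],['1'],['2'],['3']]) then 1 else 0
  let colon : Int := if c ∈ [[':'], ['?']] then 1 else 0
  let tens : Int := if m1 = ['?'] then 6 else if m1 ∈ [['0'],['1'],['2'],['3'],['4'],['5']] then 1 else 0
  let ones : Int := if m2 = ['?'] then 10
    else if m2 ∈ [['0'],['1'],['2'],['3'],['4'],['5'],['6'],['7'],['8'],['9']] then 1 else 0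
  hours * colon * tens * ones

-- ===== PRECONDITION & SPEC =====
-- whether the hour part of a (short) prefix is consistent with some hour 00..23
def pvHourOKb (p0 p1 : Char) : Bool :=
  (['?','0','1'].contains p0 && ['?','0','1','2','3','4','5','6','7','8','9'].contains p1) ||
  (['?','2'].contains p0 && ['?','0','1','2','3'].contains p1)

-- whether a string of length < 5 is a prefix (with wildcards) of some valid clock time
def pvPrefixMatchable (l : List Char) : Bool :=
  match l with
  | [] => true
  | [p0] => ['?','0','1','2'].contains p0
  | [p0,p1] => pvHourOKb p0 p1
  | [p0,p1,p2] => pvHourOKb p0 p1 && [':','?'].contains p2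
  | [p0,p1,p2,p3] => pvHourOKb p0 p1 && [':','?'].contains p2 && ['?','0','1','2','3','4','5'].contains p3
  | _ => true

-- Pre_ excludes exactly the inputs on which A raises IndexError: strings shorter than 5
-- characters whose whole prefix is still consistent with some clock time (all() then runs
-- off the end of the string).
def Pre_countTime (time : String) : Prop :=
  5 ≤ time.toList.length ∨ pvPrefixMatchable time.toList = false
instance (time : String) : Decidable (Pre_countTime time) := by unfold Pre_countTime; infer_instance
def pvWitness_countTime : String := "1?:3?"

def Spec_countTime (time : String) (out : Int) : Prop := out = countTime_alt time
instance (time : String) (out : Int) : Decidable (Spec_countTime time out) := by unfold Spec_countTime; infer_instance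

-- ===== CLAIM (what is proved, stated in full; the proofs are below) =====
def Claim_equal_countTime : Prop := ∀ (time : String), Dom_countTime time → Pre_countTime time → Spec_countTime time (countTime time)

-- ===== LEMMAS AND PROOFS =====

-- closed-form factors of B, per character (proof-side names for B's inlined if-trees)
def pvHours (a b : Char) : Int :=
  if a = '?' ∧ b = '?' then 24
  else if a = '?' then
    (if b ∈ ['0','1','2','3'] then 3 else if b ∈ ['4','5','6','7','8','9'] then 2 else 0)
  else if b = '?' then
    (if a ∈ ['0','1'] then 10 else if a = '2' then 4 else 0)
  else if (a ∈ ['0','1'] ∧ b ∈ ['0','1','2','3','4','5','6','7','8','9']) ∨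
          (a = '2' ∧ b ∈ ['0','1','2','3']) then 1 else 0

def pvColon (c : Char) : Int := if c ∈ [':', '?'] then 1 else 0

def pvTens (d : Char) : Int :=
  if d = '?' then 6 else if d ∈ ['0','1','2','3','4','5'] then 1 else 0

def pvOnes (e : Char) : Int :=
  if e = '?' then 10 else if e ∈ ['0','1','2','3','4','5','6','7','8','9'] then 1 else 0

-- the hour/minute digit test of A's pattern match, as a predicate on the number
def pvHq (a b : Char) (h : Int) : Bool :=
  (a == '?' || a == Nat.digitChar (PySem.Int.floordiv h 10).toNat) &&
  (b == '?' || b == Nat.digitChar (PySem.Int.mod h 10).toNat)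

def pvD10 : List Char := ['0','1','2','3','4','5','6','7','8','9']
def pvD4 : List Char := ['0','1','2','3']

def pvF4 (b : Char) : Int := if b = '?' then 4 else if b ∈ ['0','1','2','3'] then 1 else 0

lemma pvCases4 (x : Char) : x = '?' ∨ x = '0' ∨ x = '1' ∨ x = '2' ∨
    (x ≠ '?' ∧ x ≠ '0' ∧ x ≠ '1' ∧ x ≠ '2') := by tauto

lemma pvCases8 (x : Char) : x = '?' ∨ x = '0' ∨ x = '1' ∨ x = '2' ∨ x = '3' ∨ x = '4' ∨ x = '5' ∨
    (x ≠ '?' ∧ x ≠ '0' ∧ x ≠ '1' ∧ x ≠ '2' ∧ x ≠ '3' ∧ x ≠ '4' ∧ x ≠ '5') := by tauto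

lemma pvCases11 (x : Char) : x = '?' ∨ x = '0' ∨ x = '1' ∨ x = '2' ∨ x = '3' ∨ x = '4' ∨ x = '5' ∨
    x = '6' ∨ x = '7' ∨ x = '8' ∨ x = '9' ∨
    (x ≠ '?' ∧ x ≠ '0' ∧ x ≠ '1' ∧ x ≠ '2' ∧ x ≠ '3' ∧ x ≠ '4' ∧ x ≠ '5' ∧ x ≠ '6' ∧ x ≠ '7' ∧ x ≠ '8' ∧ x ≠ '9') := by
  tauto

lemma pvMatch_eq (a b c d e : Char) (r : List Char) (time : String)
    (ht : time.toList = a::b::c::d::e::r) (h m : Int) :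
    pvMatch time (pvFmt2 h ++ ':' :: pvFmt2 m) =
      (pvHq a b h && ((c == '?' || c == ':') && pvHq d e m)) := by
  simp [pvMatch, pvFmt2, pvHq, List.range, List.range.loop, ht, Bool.and_assoc]

lemma pvCountP_and_left (L : List Int) (p : Bool) (q : Int → Bool) :
    L.countP (fun x => p && q x) = if p then L.countP q else 0 := by
  cases p <;> simp

lemma pvSum_map_ite_const (L : List Int) (r : Int → Bool) (k : Int) :
    (L.map (fun x => if r x then k else 0)).sum = (L.countP r : Int) * k := by
  induction L with
  | nil => simp
  | cons x L ih => by_cases h : r x <;> simp [h, ih] <;> ring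

lemma pvCountA (a b c d e : Char) (r : List Char) (time : String)
    (ht : time.toList = a::b::c::d::e::r) :
    countTime time =
      ((PySem.List.pyRange 0 24 1).countP (pvHq a b) : Int) *
      ((if (c == '?' || c == ':') then 1 else 0) *
       ((PySem.List.pyRange 0 60 1).countP (pvHq d e) : Int)) := by
  unfold countTime
  simp only [pvMatch_eq a b c d e r time ht]
  simp only [PySem.List.foldl_if_add_one, pvCountP_and_left]
  rw [PySem.List.foldl_add]
  push_cast
  rw [pvSum_map_ite_const]
  by_cases hc : (c == '?' || c == ':') <;> simp [hc] <;> ring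

lemma pvCntP_pair (t : Char) (L : List Char) (R : Char → Char → Bool) :
    (L.map (fun o => (t, o))).countP (fun p => R p.1 p.2) = L.countP (fun o => R t o) := by
  rw [List.countP_map]; rfl

lemma pvCountP_and_leftC (L : List Char) (p : Bool) (q : Char → Bool) :
    L.countP (fun x => p && q x) = if p then L.countP q else 0 := by
  cases p <;> simp

lemma pvO10 (e : Char) : ((pvD10.countP (fun o => e == '?' || e == o)) : Int) = pvOnes e := by
  rcases pvCases11 e with rfl|rfl|rfl|rfl|rfl|rfl|rfl|rfl|rfl|rfl|rfl|⟨h1,h2,h3,h4,h5,h6,h7,h8,h9,h10,h11⟩ <;>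
    first | decide | simp_all [pvD10, pvOnes]

lemma pvO4 (b : Char) : ((pvD4.countP (fun o => b == '?' || b == o)) : Int) = pvF4 b := by
  rcases pvCases11 b with rfl|rfl|rfl|rfl|rfl|rfl|rfl|rfl|rfl|rfl|rfl|⟨h1,h2,h3,h4,h5,h6,h7,h8,h9,h10,h11⟩ <;>
    first | decide | simp_all [pvD4, pvF4]

lemma pvHL (a b : Char) :
    ((PySem.List.pyRange 0 24 1).countP (pvHq a b) : Int) = pvHours a b := by
  have hmap : ((PySem.List.pyRange 0 24 1).map
      (fun h => (Nat.digitChar (PySem.Int.floordiv h 10).toNat,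
                 Nat.digitChar (PySem.Int.mod h 10).toNat))) =
      pvD10.map (fun o => ('0', o)) ++ pvD10.map (fun o => ('1', o)) ++ pvD4.map (fun o => ('2', o)) := by
    decide
  have h1 : (PySem.List.pyRange 0 24 1).countP (pvHq a b)
      = (pvD10.map (fun o => ('0', o)) ++ pvD10.map (fun o => ('1', o)) ++ pvD4.map (fun o => ('2', o))).countP
          (fun p => (a == '?' || a == p.1) && (b == '?' || b == p.2)) := by
    rw [← hmap, List.countP_map]; rfl
  rw [h1, List.countP_append, List.countP_append,
      pvCntP_pair '0' pvD10 (fun x y => (a == '?' || a == x) && (b == '?' || b == y)),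
      pvCntP_pair '1' pvD10 (fun x y => (a == '?' || a == x) && (b == '?' || b == y)),
      pvCntP_pair '2' pvD4 (fun x y => (a == '?' || a == x) && (b == '?' || b == y)),
      pvCountP_and_leftC, pvCountP_and_leftC, pvCountP_and_leftC]
  push_cast
  rw [pvO10, pvO4]
  rcases pvCases4 a with rfl|rfl|rfl|rfl|⟨h1,h2,h3,h4⟩ <;>
    rcases pvCases11 b with rfl|rfl|rfl|rfl|rfl|rfl|rfl|rfl|rfl|rfl|rfl|⟨g1,g2,g3,g4,g5,g6,g7,g8,g9,g10,g11⟩ <;>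
    first | decide | (simp_all [pvHours, pvOnes, pvF4]; try ring)

lemma pvML (d e : Char) :
    ((PySem.List.pyRange 0 60 1).countP (pvHq d e) : Int) = pvTens d * pvOnes e := by
  have hmap : ((PySem.List.pyRange 0 60 1).map
      (fun h => (Nat.digitChar (PySem.Int.floordiv h 10).toNat,
                 Nat.digitChar (PySem.Int.mod h 10).toNat))) =
      pvD10.map (fun o => ('0', o)) ++ pvD10.map (fun o => ('1', o)) ++ pvD10.map (fun o => ('2', o))
        ++ pvD10.map (fun o => ('3', o)) ++ pvD10.map (fun o => ('4', o)) ++ pvD10.map (fun o => ('5', o)) := by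
    decide
  have h1 : (PySem.List.pyRange 0 60 1).countP (pvHq d e)
      = (pvD10.map (fun o => ('0', o)) ++ pvD10.map (fun o => ('1', o)) ++ pvD10.map (fun o => ('2', o))
          ++ pvD10.map (fun o => ('3', o)) ++ pvD10.map (fun o => ('4', o)) ++ pvD10.map (fun o => ('5', o))).countP
          (fun p => (d == '?' || d == p.1) && (e == '?' || e == p.2)) := by
    rw [← hmap, List.countP_map]; rfl
  rw [h1]
  rw [List.countP_append, List.countP_append, List.countP_append, List.countP_append, List.countP_append,
      pvCntP_pair '0' pvD10 (fun x y => (d == '?' || d == x) && (e == '?' || e == y)),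
      pvCntP_pair '1' pvD10 (fun x y => (d == '?' || d == x) && (e == '?' || e == y)),
      pvCntP_pair '2' pvD10 (fun x y => (d == '?' || d == x) && (e == '?' || e == y)),
      pvCntP_pair '3' pvD10 (fun x y => (d == '?' || d == x) && (e == '?' || e == y)),
      pvCntP_pair '4' pvD10 (fun x y => (d == '?' || d == x) && (e == '?' || e == y)),
      pvCntP_pair '5' pvD10 (fun x y => (d == '?' || d == x) && (e == '?' || e == y)),
      pvCountP_and_leftC, pvCountP_and_leftC, pvCountP_and_leftC, pvCountP_and_leftC, pvCountP_and_leftC, pvCountP_and_leftC]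
  push_cast
  rw [pvO10]
  rcases pvCases8 d with rfl|rfl|rfl|rfl|rfl|rfl|rfl|hg
  case inr.inr.inr.inr.inr.inr.inr =>
    obtain ⟨g1,g2,g3,g4,g5,g6,g7⟩ := hg
    simp [pvTens, g1, g2, g3, g4, g5, g6, g7]
  all_goals simp [pvTens] <;> ring

lemma pvColon_eq (c : Char) : ((if (c == '?' || c == ':') then 1 else 0 : Int)) = pvColon c := by
  by_cases h1 : c = '?' <;> by_cases h2 : c = ':' <;> simp [pvColon, h1, h2]

lemma pvAlt_long (a b c d e : Char) (r : List Char) (time : String)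
    (ht : time.toList = a::b::c::d::e::r) :
    countTime_alt time = pvHours a b * pvColon c * pvTens d * pvOnes e := by
  simp only [countTime_alt, ht]
  simp [PySem.List.slice_toNat, pvHours, pvColon, pvTens, pvOnes]

lemma pvA_short (time : String) (h : time.toList.length < 5) : countTime time = 0 := by
  have hfalse : ∀ s, pvMatch time s = false := by
    intro s
    unfold pvMatch
    rw [List.all_eq_false]
    refine ⟨time.toList.length, ?_, ?_⟩
    · rw [List.mem_range]; omega
    · have hnone : PySem.Str.pyGet? time (Int.ofNat time.toList.length) = none := by
        simp
      rw [hnone]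
      simp
  simp [countTime, hfalse]

lemma pvAlt_short (time : String) (h : time.toList.length < 5) : countTime_alt time = 0 := by
  have hm2 : PySem.List.slice time.toList (some 4) (some 5) = [] := by
    have hd : time.toList.drop 4 = [] := by
      apply List.drop_eq_nil_of_le; omega
    simp [PySem.List.slice_toNat, hd]
  simp only [countTime_alt, hm2]
  simp

-- ===== VERDICT (by name: the statement is the Claim_ definition above) =====
theorem countTime_spec : Claim_equal_countTime := by
  intro time hdom hpre
  unfold Spec_countTime
  by_cases hlen : 5 ≤ time.toList.length
  · rcases htl : time.toList with _ | ⟨a, _ | ⟨b, _ | ⟨c, _ | ⟨d, _ | ⟨e, r⟩⟩⟩⟩⟩ <;>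
      rw [htl] at hlen <;> simp at hlen
    rw [pvCountA a b c d e r time htl, pvHL, pvML, pvColon_eq, pvAlt_long a b c d e r time htl]
    ring
  · rw [pvA_short time (by omega), pvAlt_short time (by omega)]
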